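-- pv_equiv track=rewrite | github.com/MeGotsThis/botgotsthis-random | library/number.py | factorialBaseStr
-- ===== SOURCE A (Python) =====
-- def digit_to_char(digit: int) -> str:
--     if digit < 10:
--         return str(digit)
--     return chr(ord('A') + digit - 10)
--
-- def factorialBaseStr(i: int) -> str:
--     if i < 0:
--         raise ValueError('factorial base does not have negative numbers')
--     digits: str = ''
--     base: int = 1
--     if not i:
--         digits = '0'
--     else:
--         while i != 0:
--             remainder: int
--             i, remainder = divmod(i, base)
--             digits = digit_to_char(remainder) + digits
--             base += 1
--             if base >= 36:
--                 raise ValueError(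
--                     'Value too large to represent in factorial base')
--     return digits
-- ===== SOURCE B (Python) =====
-- def digit_to_char(digit: int) -> str:
--     if digit < 10:
--         return str(digit)
--     return chr(ord('A') + digit - 10)
--
--
-- def factorialBaseStr(i: int) -> str:
--     if i < 0:
--         raise ValueError('factorial base does not have negative numbers')
--     if i == 0:
--         return '0'
--     # place values 1!, 2!, ..., k! where k! is the largest factorial <= i
--     facts = [1]
--     while facts[-1] * (len(facts) + 1) <= i:
--         facts.append(facts[-1] * (len(facts) + 1))
--     if len(facts) >= 34:
--         raise ValueError('Value too large to represent in factorial base')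
--     # emit digits most-significant-first, then the always-zero 0!-place digit
--     out = ''
--     for pv in reversed(facts):
--         d, i = divmod(i, pv)
--         out += digit_to_char(d)
--     return out + '0'
-- ===== Notes on version B (the rewrite author's own statement) =====
-- stated objective: alternative
-- what changed: B precomputes the factorial place-values and emits digits most-significant-first by divmod from the highest place down, instead of A's least-significant-first loop that prepends each digit to the string.
import Mathlib
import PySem

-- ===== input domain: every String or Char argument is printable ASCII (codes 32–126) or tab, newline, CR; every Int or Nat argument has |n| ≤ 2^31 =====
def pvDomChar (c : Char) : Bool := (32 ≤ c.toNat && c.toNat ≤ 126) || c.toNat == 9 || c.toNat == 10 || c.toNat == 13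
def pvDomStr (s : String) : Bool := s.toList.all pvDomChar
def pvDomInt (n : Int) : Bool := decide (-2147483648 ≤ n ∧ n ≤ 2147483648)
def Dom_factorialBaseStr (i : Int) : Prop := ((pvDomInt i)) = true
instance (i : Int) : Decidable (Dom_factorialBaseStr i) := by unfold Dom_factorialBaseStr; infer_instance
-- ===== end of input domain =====

-- B emits the factorial-base digits most-significant-first from precomputed place values,
-- instead of A's least-significant-first loop; return values agree on Pre_ (alternative decomposition, no speed claim).

-- ===== PORT A =====
-- digit_to_char, shared helper of both Pythons
def digitToChar (d : Int) : String :=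
  if d < 10 then PySem.Int.toStr d
  else String.singleton (Char.ofNat (65 + (d - 10).toNat))

-- A's while loop; fuel 36 bounds the iterations (base grows 1,2,… and the loop
-- raises once base reaches 36, so at most 35 iterations happen). "" stands for the raise paths,
-- which Pre_ excludes.
def faLoop (fuel : Nat) (i base : Int) (digits : String) : String :=
  match fuel with
  | 0 => ""
  | fuel + 1 =>
    if i ≠ 0 then
      let r := PySem.Int.mod i base
      let q := PySem.Int.floordiv i base
      let digits' := digitToChar r ++ digits
      let base' := base + 1
      if base' ≥ 36 then ""  -- ValueError: too large
      else faLoop fuel q base' digits'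
    else digits

def factorialBaseStr (i : Int) : String :=
  if i < 0 then ""  -- ValueError: negative
  else if i = 0 then "0"
  else faLoop 36 i 1 ""

-- ===== PORT B =====
-- B's while loop growing facts = [1!, 2!, …]; fuel 35 bounds it as in Source B (the length check raises at 34)
def bFacts (fuel : Nat) (facts : List Int) (i : Int) : List Int :=
  match fuel with
  | 0 => facts
  | fuel + 1 =>
    let last := (facts.getLast?).getD 1
    if last * (facts.length + 1) ≤ i then
      bFacts fuel (facts ++ [last * (facts.length + 1)]) i
    else facts

-- B's for loop over reversed(facts), accumulating the output string, then '+ "0"'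
def fbLoop (pvs : List Int) (i : Int) (out : String) : String :=
  match pvs with
  | [] => out ++ "0"
  | pv :: rest =>
    fbLoop rest (PySem.Int.mod i pv) (out ++ digitToChar (PySem.Int.floordiv i pv))

def factorialBaseStr_alt (i : Int) : String :=
  if i < 0 then ""  -- ValueError: negative
  else if i = 0 then "0"
  else
    let facts := bFacts 35 [1] i
    if facts.length ≥ 34 then ""  -- ValueError: too large
    else fbLoop facts.reverse i ""

-- ===== PRECONDITION & SPEC =====
-- Pre_: exactly where Python A returns: nonnegative (else ValueError) and below 34!
-- (at 34! and above A raises 'Value too large'); every i in Dom with 0 ≤ i satisfies it.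
def Pre_factorialBaseStr (i : Int) : Prop :=
  0 ≤ i ∧ i < 295232799039604140847618609643520000000

instance (i : Int) : Decidable (Pre_factorialBaseStr i) := by
  unfold Pre_factorialBaseStr; infer_instance

def pvWitness_factorialBaseStr : Int := (23)

def Spec_factorialBaseStr (i : Int) (out : String) : Prop := out = factorialBaseStr_alt i
instance (i : Int) (out : String) : Decidable (Spec_factorialBaseStr i out) := by unfold Spec_factorialBaseStr; infer_instance

-- ===== CLAIM (what is proved, stated in full; the proofs are below) =====
def Claim_equal_factorialBaseStr : Prop := ∀ (i : Int), Dom_factorialBaseStr i → Pre_factorialBaseStr i → Spec_factorialBaseStr i (factorialBaseStr i)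

-- ===== LEMMAS AND PROOFS =====

-- product of the k bases b+2, b+3, …, b+k+1
def pr (b : Nat) : Nat → Nat
  | 0 => 1
  | t + 1 => (b + 2) * pr (b + 1) t

-- A's digit string of n at bases b+2, b+3, … (least-significant digit appended last)
def asc (n b : Nat) : String :=
  if h : n = 0 then ""
  else asc (n / (b + 2)) (b + 1) ++ digitToChar ((n % (b + 2) : Nat) : Int)
termination_by n
decreasing_by exact Nat.div_lt_self (Nat.pos_of_ne_zero h) (by omega)

-- B's k digits of n, most-significant (place value pr b (k-1)) first
def descG (b : Nat) : Nat → Nat → String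
  | 0, _ => ""
  | k + 1, n => digitToChar ((n / pr b k : Nat) : Int) ++ descG b k (n % pr b k)

theorem pr_pos (b t : Nat) : 0 < pr b t := by
  induction t generalizing b with
  | zero => simp [pr]
  | succ t ih => simp only [pr]; exact Nat.mul_pos (by omega) (ih (b + 1))

theorem pr_mul_factorial (b t : Nat) : pr b t * (b + 1).factorial = (b + 1 + t).factorial := by
  induction t generalizing b with
  | zero => simp [pr]
  | succ t ih =>
    have h := ih (b + 1)
    simp only [pr]
    have e1 : (b + 1 + 1).factorial = (b + 2) * (b + 1).factorial := by
      rw [Nat.factorial_succ]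
    calc (b + 2) * pr (b + 1) t * (b + 1).factorial
        = pr (b + 1) t * ((b + 1 + 1).factorial) := by rw [e1]; ring
      _ = (b + 1 + 1 + t).factorial := h
      _ = (b + 1 + (t + 1)).factorial := by congr 1; omega

theorem pr_zero_eq_factorial (k : Nat) : pr 0 k = (k + 1).factorial := by
  have h := pr_mul_factorial 0 k
  rw [Nat.factorial_one, Nat.mul_one] at h
  rw [show 1 + k = k + 1 from Nat.add_comm 1 k] at h
  exact h

theorem string_append_assoc (a b c : String) : a ++ b ++ c = a ++ (b ++ c) := by
  apply String.ext
  simp [String.toList_append]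

theorem string_empty_append (s : String) : "" ++ s = s := by
  apply String.ext
  simp [String.toList_append]

theorem string_append_empty (s : String) : s ++ "" = s := by
  apply String.ext
  simp [String.toList_append]

-- peel the BOTTOM digit off descG
theorem descG_bot (k : Nat) : ∀ b n, n < pr b (k + 1) →
    descG b (k + 1) n = descG (b + 1) k (n / (b + 2)) ++ digitToChar ((n % (b + 2) : Nat) : Int) := by
  induction k with
  | zero =>
    intro b n hn
    simp only [pr] at hn
    have hn' : n < b + 2 := by have := pr_pos (b+1) 0; simp [pr] at hn ⊢; omega
    simp [descG, pr, Nat.mod_eq_of_lt hn', Nat.div_eq_of_lt hn', string_empty_append, string_append_empty]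
  | succ k ih =>
    intro b n hn
    have hP : pr b (k + 1) = (b + 2) * pr (b + 1) k := rfl
    have hpos : 0 < pr b (k + 1) := pr_pos b (k + 1)
    have hmod : n % pr b (k + 1) < pr b (k + 1) := Nat.mod_lt _ hpos
    have htail := ih b (n % pr b (k + 1)) hmod
    -- descG b (k+2) n = top ++ descG b (k+1) (n % P)
    show digitToChar ((n / pr b (k + 1) : Nat) : Int) ++ descG b (k + 1) (n % pr b (k + 1)) =
         descG (b + 1) (k + 1) (n / (b + 2)) ++ digitToChar ((n % (b + 2) : Nat) : Int)
    rw [htail]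
    have h1 : n / pr b (k + 1) = (n / (b + 2)) / pr (b + 1) k := by
      rw [hP, Nat.div_div_eq_div_mul]
    have h2 : (n % pr b (k + 1)) / (b + 2) = (n / (b + 2)) % pr (b + 1) k := by
      rw [hP]
      exact Nat.mod_mul_right_div_self n (b + 2) (pr (b + 1) k)
    have h3 : (n % pr b (k + 1)) % (b + 2) = n % (b + 2) := by
      apply Nat.mod_mod_of_dvd
      exact ⟨pr (b + 1) k, hP⟩
    rw [h1, h2, h3]
    show _ = digitToChar ((n / (b+2) / pr (b+1) k : Nat) : Int) ++ descG (b+1) k ((n / (b+2)) % pr (b+1) k) ++ _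
    rw [string_append_assoc]

theorem descG_zero (b k : Nat) : descG b k 0 = String.ofList (List.replicate k '0') := by
  induction k generalizing b with
  | zero =>
    apply String.ext
    simp [descG]
  | succ k ih =>
    simp only [descG, Nat.zero_div, Nat.zero_mod, ih b]
    have h0 : digitToChar ((0 : Nat) : Int) = "0" := by decide
    rw [h0]
    apply String.ext
    simp [String.toList_append, List.replicate_succ]

-- descG is asc padded with leading zero characters
theorem descG_eq_pad_asc : ∀ n b k, n < pr b k →
    ∃ z, descG b k n = String.ofList (List.replicate z '0') ++ asc n b := by
  intro n
  induction n using Nat.strong_induction_on with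
  | _ n ih =>
    intro b k hn
    by_cases h0 : n = 0
    · subst h0
      refine ⟨k, ?_⟩
      have ha : asc 0 b = "" := by simp [asc]
      rw [descG_zero, ha, string_append_empty]
    · have hk : k ≠ 0 := by
        rintro rfl; simp [pr] at hn; omega
      obtain ⟨k', rfl⟩ := Nat.exists_eq_succ_of_ne_zero hk
      have hq : n / (b + 2) < n := Nat.div_lt_self (Nat.pos_of_ne_zero h0) (by omega)
      have hqlt : n / (b + 2) < pr (b + 1) k' := Nat.div_lt_of_lt_mul hn
      obtain ⟨z, hz⟩ := ih (n / (b + 2)) hq (b + 1) k' hqlt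
      refine ⟨z, ?_⟩
      rw [descG_bot k' b n hn, hz]
      conv_rhs => rw [asc]
      simp only [h0, dite_false]
      rw [string_append_assoc]

-- characterization of A's loop
theorem faLoop_eq_asc : ∀ n b t fuel digits, n < pr b t → t < fuel → b + 2 + t ≤ 35 →
    faLoop fuel ((n : Nat) : Int) (((b : Nat) : Int) + 2) digits = asc n b ++ digits := by
  intro n
  induction n using Nat.strong_induction_on with
  | _ n ih =>
    intro b t fuel digits hn ht hb
    obtain ⟨fuel', rfl⟩ := Nat.exists_eq_succ_of_ne_zero (by omega : fuel ≠ 0)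
    by_cases h0 : n = 0
    · subst h0
      rw [asc]
      simp [faLoop, string_empty_append]
    · have ht1 : t ≠ 0 := by rintro rfl; simp [pr] at hn; omega
      obtain ⟨t', rfl⟩ := Nat.exists_eq_succ_of_ne_zero ht1
      have hne : ((n : Nat) : Int) ≠ 0 := by exact_mod_cast h0
      have hb2 : (((b : Nat) : Int) + 2) = (((b + 2 : Nat) : Nat) : Int) := by push_cast; ring
      have hmod : PySem.Int.mod ((n : Nat) : Int) (((b : Nat) : Int) + 2) = ((n % (b + 2) : Nat) : Int) := by
        rw [hb2]; exact PySem.Int.mod_natCast n (b + 2)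
      have hdiv : PySem.Int.floordiv ((n : Nat) : Int) (((b : Nat) : Int) + 2) = ((n / (b + 2) : Nat) : Int) := by
        rw [hb2]; exact PySem.Int.floordiv_natCast n (b + 2)
      have hnoraise : ¬ ((((b : Nat) : Int) + 2) + 1 ≥ 36) := by
        have : (b : Int) ≤ 32 := by exact_mod_cast (by omega : b ≤ 32)
        omega
      rw [faLoop]
      simp only [hne, if_true, hmod, hdiv, hnoraise, if_false, ite_not]
      have hq : n / (b + 2) < n := Nat.div_lt_self (Nat.pos_of_ne_zero h0) (by omega)
      have hqlt : n / (b + 2) < pr (b + 1) t' := Nat.div_lt_of_lt_mul hn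
      have hstep : (((b : Nat) : Int) + 2) + 1 = (((b + 1 : Nat) : Nat) : Int) + 2 := by push_cast; ring
      rw [hstep,
          ih (n / (b + 2)) hq (b + 1) t' fuel' (digitToChar ((n % (b + 2) : Nat) : Int) ++ digits) hqlt (by omega) (by omega)]
      conv_rhs => rw [asc]
      rw [dif_neg h0, string_append_assoc]

-- the facts list [1!, …, k!] built by B, as Ints
def factsUpTo (k : Nat) : List Int := (List.range' 1 k).map (fun m => ((Nat.factorial m : Nat) : Int))

theorem factsUpTo_concat (k : Nat) :
    factsUpTo (k + 1) = factsUpTo k ++ [((Nat.factorial (k + 1) : Nat) : Int)] := by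
  unfold factsUpTo
  rw [List.range'_1_concat]
  simp [Nat.add_comm]

theorem factsUpTo_length (k : Nat) : (factsUpTo k).length = k := by
  simp [factsUpTo]

theorem factsUpTo_getLast (k : Nat) (hk : 1 ≤ k) :
    ((factsUpTo k).getLast?).getD 1 = ((Nat.factorial k : Nat) : Int) := by
  obtain ⟨k', rfl⟩ := Nat.exists_eq_succ_of_ne_zero (by omega : k ≠ 0)
  rw [factsUpTo_concat]
  simp

-- B's build loop reaches exactly factsUpTo k when k! ≤ n < (k+1)!
theorem bFacts_eq : ∀ fuel j k (n : Nat), 1 ≤ j → j ≤ k → k - j < fuel →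
    Nat.factorial k ≤ n → n < Nat.factorial (k + 1) →
    bFacts fuel (factsUpTo j) ((n : Nat) : Int) = factsUpTo k := by
  intro fuel
  induction fuel with
  | zero => intro j k n _ _ h; omega
  | succ fuel ih =>
    intro j k n hj hjk hfuel hkn hnk
    rw [bFacts]
    rw [factsUpTo_getLast j hj, factsUpTo_length]
    by_cases hlt : j < k
    · have hle : Nat.factorial (j + 1) ≤ n := le_trans (Nat.factorial_le (by omega)) hkn
      have hcond : ((Nat.factorial j : Nat) : Int) * ((j : Nat) + 1) ≤ ((n : Nat) : Int) := by
        have : ((Nat.factorial j * (j + 1) : Nat) : Int) ≤ ((n : Nat) : Int) := by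
          exact_mod_cast (by rw [Nat.mul_comm]; exact hle : Nat.factorial j * (j + 1) ≤ n)
        push_cast at this ⊢
        convert this using 2
      rw [if_pos hcond]
      have harg : factsUpTo j ++ [((Nat.factorial j : Nat) : Int) * (((j : Nat) : Int) + 1)] = factsUpTo (j + 1) := by
        rw [factsUpTo_concat]
        congr 1
        simp only [Nat.factorial_succ]
        push_cast
        ring
      rw [harg]
      exact ih (j + 1) k n (by omega) (by omega) (by omega) hkn hnk
    · have hjeq : j = k := by omega
      subst hjeq
      have hcond : ¬ (((Nat.factorial j : Nat) : Int) * (((j : Nat) : Int) + 1) ≤ ((n : Nat) : Int)) := by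
        have : n < Nat.factorial j * (j + 1) := by
          rw [Nat.mul_comm, ← Nat.factorial_succ]; exact hnk
        have h2 : ((n : Nat) : Int) < ((Nat.factorial j * (j + 1) : Nat) : Int) := by exact_mod_cast this
        push_cast at h2
        omega
      rw [if_neg hcond]

-- B's output loop produces descG
theorem fbLoop_eq_descG : ∀ k (n : Nat) out,
    fbLoop (factsUpTo k).reverse ((n : Nat) : Int) out = out ++ descG 0 k n ++ "0" := by
  intro k
  induction k with
  | zero =>
    intro n out
    simp [factsUpTo, fbLoop, descG, string_append_empty]
  | succ k ih =>
    intro n out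
    rw [factsUpTo_concat]
    simp only [List.reverse_append, List.reverse_cons, List.reverse_nil, List.nil_append,
      List.cons_append, List.singleton_append]
    rw [fbLoop]
    have hpr : Nat.factorial (k + 1) = pr 0 k := (pr_zero_eq_factorial k).symm
    rw [PySem.Int.mod_natCast, PySem.Int.floordiv_natCast, hpr,
        ih (n % pr 0 k) (out ++ digitToChar ((n / pr 0 k : Nat) : Int))]
    show _ = out ++ (digitToChar ((n / pr 0 k : Nat) : Int) ++ descG 0 k (n % pr 0 k)) ++ "0"
    rw [string_append_assoc out]

-- the most-significant digit of descG 0 (k) n is nonzero when k! ≤ n, forcing z = 0 in the padding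
theorem asc_eq_descG (k n : Nat) (hk1 : 1 ≤ k) (hk : k ≤ 12)
    (hlo : Nat.factorial k ≤ n) (hhi : n < Nat.factorial (k + 1)) :
    asc n 0 = descG 0 k n := by
  have hnpr : n < pr 0 k := by rw [pr_zero_eq_factorial]; exact hhi
  obtain ⟨z, hz⟩ := descG_eq_pad_asc n 0 k hnpr
  obtain ⟨k', rfl⟩ := Nat.exists_eq_succ_of_ne_zero (by omega : k ≠ 0)
  -- top digit d0 = n / (k'+1)! is between 1 and 12
  have hprk : pr 0 k' = Nat.factorial (k' + 1) := pr_zero_eq_factorial k'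
  have hd0pos : 1 ≤ n / pr 0 k' := by
    rw [hprk]
    exact Nat.one_le_div_iff (Nat.factorial_pos _) |>.mpr hlo
  have hk12 : k' + 1 ≤ 12 := hk
  have hd0le : n / pr 0 k' ≤ k' + 1 := by
    rw [hprk]
    have h1 : n < Nat.factorial (k' + 1) * (k' + 2) := by
      rw [Nat.mul_comm, ← Nat.factorial_succ]; exact hhi
    have := Nat.div_lt_of_lt_mul h1
    omega
  set d0 := n / pr 0 k' with hd0
  have hd0le12 : d0 ≤ 12 := le_trans hd0le (by omega)
  have hz0 : z = 0 := by
    by_contra hzne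
    obtain ⟨z', rfl⟩ := Nat.exists_eq_succ_of_ne_zero hzne
    -- compare first characters via the character lists
    have hdata := congrArg String.toList hz
    rw [show descG 0 (k' + 1) n = digitToChar ((n / pr 0 k' : Nat) : Int) ++ descG 0 k' (n % pr 0 k') from rfl] at hdata
    simp only [String.toList_append, ← hd0] at hdata
    have hne : (digitToChar ((d0 : Nat) : Int)).toList ≠ [] := by
      interval_cases d0 <;> decide
    obtain ⟨c, tl, hx⟩ := List.exists_cons_of_ne_nil hne
    rw [hx, List.cons_append, String.toList_ofList, List.replicate_succ, List.cons_append] at hdata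
    have hc : c = '0' := (List.cons.injEq _ _ _ _ ▸ hdata).1
    have hhead : (digitToChar ((d0 : Nat) : Int)).toList.head? = some '0' := by
      rw [hx, hc]; rfl
    have : (digitToChar ((d0 : Nat) : Int)).toList.head? ≠ some '0' := by
      interval_cases d0 <;> decide
    exact this hhead
  subst hz0
  rw [hz]
  apply String.ext
  simp [String.toList_append]

-- existence of the digit count k for 0 < n < 13!
theorem exists_k (n : Nat) (h0 : 0 < n) (h13 : n < 6227020800) :
    ∃ k, 1 ≤ k ∧ k ≤ 12 ∧ Nat.factorial k ≤ n ∧ n < Nat.factorial (k + 1) := by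
  by_cases h2 : n < 2
  · exact ⟨1, by omega, by omega, by simp [Nat.factorial]; omega, by simp [Nat.factorial]; omega⟩
  by_cases h3 : n < 6
  · exact ⟨2, by omega, by omega, by simp [Nat.factorial]; omega, by simp [Nat.factorial]; omega⟩
  by_cases h4 : n < 24
  · exact ⟨3, by omega, by omega, by simp [Nat.factorial]; omega, by simp [Nat.factorial]; omega⟩
  by_cases h5 : n < 120
  · exact ⟨4, by omega, by omega, by simp [Nat.factorial]; omega, by simp [Nat.factorial]; omega⟩
  by_cases h6 : n < 720
  · exact ⟨5, by omega, by omega, by simp [Nat.factorial]; omega, by simp [Nat.factorial]; omega⟩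
  by_cases h7 : n < 5040
  · exact ⟨6, by omega, by omega, by simp [Nat.factorial]; omega, by simp [Nat.factorial]; omega⟩
  by_cases h8 : n < 40320
  · exact ⟨7, by omega, by omega, by simp [Nat.factorial]; omega, by simp [Nat.factorial]; omega⟩
  by_cases h9 : n < 362880
  · exact ⟨8, by omega, by omega, by simp [Nat.factorial]; omega, by simp [Nat.factorial]; omega⟩
  by_cases h10 : n < 3628800
  · exact ⟨9, by omega, by omega, by simp [Nat.factorial]; omega, by simp [Nat.factorial]; omega⟩
  by_cases h11 : n < 39916800
  · exact ⟨10, by omega, by omega, by simp [Nat.factorial]; omega, by simp [Nat.factorial]; omega⟩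
  by_cases h12 : n < 479001600
  · exact ⟨11, by omega, by omega, by simp [Nat.factorial]; omega, by simp [Nat.factorial]; omega⟩
  · exact ⟨12, by omega, by omega, by simp [Nat.factorial]; omega, by simp [Nat.factorial]; omega⟩

-- ===== VERDICT (by name: the statement is the Claim_ definition above) =====
theorem factorialBaseStr_spec : Claim_equal_factorialBaseStr := by
  intro i hdom hpre
  unfold Spec_factorialBaseStr
  obtain ⟨hge, _⟩ := hpre
  unfold Dom_factorialBaseStr pvDomInt at hdom
  rw [decide_eq_true_iff] at hdom
  by_cases h0 : i = 0
  · subst h0; rfl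
  · -- positive case
    have hipos : 0 < i := lt_of_le_of_ne hge (Ne.symm h0)
    set n := i.toNat with hn
    have hin : i = ((n : Nat) : Int) := by omega
    have hnpos : 0 < n := by omega
    have hn13 : n < 6227020800 := by omega
    obtain ⟨k, hk1, hk12, hlo, hhi⟩ := exists_k n hnpos hn13
    -- A side
    have hA : factorialBaseStr i = asc n 0 ++ "0" := by
      unfold factorialBaseStr
      rw [if_neg (by omega), if_neg h0, hin]
      -- unroll the first iteration (base = 1)
      rw [show (36 : Nat) = 35 + 1 from rfl, faLoop]
      have hne : ((n : Nat) : Int) ≠ 0 := by exact_mod_cast (by omega : n ≠ 0)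
      simp only [hne, if_true, ite_not]
      have hm1 : PySem.Int.mod ((n : Nat) : Int) 1 = 0 := by
        have := PySem.Int.mod_natCast n 1
        simpa using this
      have hd1 : PySem.Int.floordiv ((n : Nat) : Int) 1 = ((n : Nat) : Int) := by
        have := PySem.Int.floordiv_natCast n 1
        simpa using this
      rw [if_neg (by norm_num)]
      rw [hm1, hd1]
      have hdz : digitToChar 0 ++ "" = "0" := by decide
      rw [hdz]
      have h2 : (1 : Int) + 1 = (((0 : Nat) : Int)) + 2 := by norm_num
      rw [h2]
      have hnpr : n < pr 0 12 := by
        have : pr 0 12 = Nat.factorial 13 := pr_zero_eq_factorial 12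
        rw [this]
        have : (6227020800 : Nat) ≤ Nat.factorial 13 := by decide
        omega
      exact faLoop_eq_asc n 0 12 35 "0" hnpr (by omega) (by omega)
    -- B side
    have hB : factorialBaseStr_alt i = descG 0 k n ++ "0" := by
      unfold factorialBaseStr_alt
      rw [if_neg (by omega), if_neg h0, hin]
      have hfacts : bFacts 35 [1] ((n : Nat) : Int) = factsUpTo k := by
        have h1 : factsUpTo 1 = [(1 : Int)] := by decide
        rw [← h1]
        exact bFacts_eq 35 1 k n (by omega) (by omega) (by omega) hlo hhi
      simp only [hfacts, factsUpTo_length]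
      rw [if_neg (by omega)]
      rw [fbLoop_eq_descG k n ""]
      rw [string_empty_append]
    rw [hA, hB, asc_eq_descG k n hk1 hk12 hlo hhi]
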